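-- pv_equiv track=rewrite | github.com/gulbiarchive/programmers | lv2/70129/70129.py | solution
-- ===== SOURCE A (Python) =====
-- def solution(s):
--     count = 0 # 변환 횟수
--     zeros_removed = 0 # 제거된 0 개수
--
--     while s != '1':
--         # 제거된 0 개수
--         zeros = s.count('0')
--         zeros_removed += zeros
--
--         s = s.replace('0', '') # 0 제거
--         length = len(s) # 남은 문자열 길이 구하기
--
--         s = bin(length)[2:]
--
--         count += 1
--
--     return [count, zeros_removed]
-- ===== SOURCE B (Python) =====
-- def solution(s):
--     if s == '1':
--         return [0, 0]
--
--     def orbit(n):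
--         # successive surviving-character counts, down to 1
--         return [n] if n == 1 else [n] + orbit(n.bit_count())
--
--     ms = orbit(len(s) - s.count('0'))
--     removed = s.count('0') + sum(m.bit_length() - m.bit_count() for m in ms)
--     return [len(ms), removed]
-- ===== Notes on version B (the rewrite author's own statement) =====
-- stated objective: alternative
-- what changed: B first materializes the whole trajectory of surviving-character counts as an integer list via a recursive generator (orbit), then derives both answers by aggregate passes over that list (len and a sum of bit_length-bit_count), instead of A's destructive while loop that rewrites a binary string with bin/replace and maintains running counters; Pre_ excludes inputs consisting only of '0' characters (including the empty string), on which A's while loop never terminates (B's recursion also diverges there).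
-- outside the precondition, e.g. on solution('0'): A does not finish within the time limit, B raises RecursionError
import Mathlib
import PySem

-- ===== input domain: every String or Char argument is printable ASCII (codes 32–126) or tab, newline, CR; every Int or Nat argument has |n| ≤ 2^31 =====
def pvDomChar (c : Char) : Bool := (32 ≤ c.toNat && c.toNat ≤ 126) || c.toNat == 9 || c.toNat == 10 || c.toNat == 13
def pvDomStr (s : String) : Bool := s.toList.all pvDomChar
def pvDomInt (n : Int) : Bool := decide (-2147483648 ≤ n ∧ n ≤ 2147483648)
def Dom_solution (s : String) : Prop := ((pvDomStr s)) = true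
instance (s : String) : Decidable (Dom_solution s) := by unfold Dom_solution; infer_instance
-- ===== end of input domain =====

-- B builds the whole popcount trajectory as a list and aggregates it, instead of A's
-- string-rewriting while loop with running counters; A = B everywhere A terminates.

-- ===== PORT A =====
-- bin(n)[2:] for n ≥ 1, ported by hand (exact: Python's bin with the '0b' prefix stripped).
def binRec (n : Nat) : List Char :=
  match n with
  | 0 => []
  | m+1 => binRec ((m+1) / 2) ++ [if (m+1) % 2 = 1 then '1' else '0']
decreasing_by omega

-- bin(n)[2:] including n = 0 (bin(0)[2:] = "0")
def binRepr (n : Nat) : List Char := if n = 0 then ['0'] else binRec n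

-- A's while loop; the fuel argument is only a totality guard (A diverges on all-'0'
-- inputs, which Pre_solution excludes; inside Pre_solution the fuel is never exhausted).
def loopA : Nat → List Char → Int → Int → List Int
  | 0, _, count, removed => [count, removed]
  | f+1, s, count, removed =>
    if s = ['1'] then [count, removed]
    else -- zeros = s.count('0'); s = bin(len(s.replace('0','')))[2:]
      loopA f (binRepr ((s.filter (fun c => c ≠ '0')).length)) (count + 1)
        (removed + ((s.count '0' : Nat) : Int))

def solution (s : String) : List Int := loopA (s.toList.length + 64) s.toList 0 0

-- ===== PORT B =====
-- n.bit_count()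
def popcount (n : Nat) : Nat :=
  match n with
  | 0 => 0
  | m+1 => popcount ((m+1) / 2) + (m+1) % 2
decreasing_by omega

-- n.bit_length()
def bitLen (n : Nat) : Nat :=
  match n with
  | 0 => 0
  | m+1 => bitLen ((m+1) / 2) + 1
decreasing_by omega

-- B's recursive orbit builder; fuel is only a totality guard (B's Python recursion
-- diverges only at n = 0, i.e. on all-'0' inputs, which Pre_solution excludes).
def orbitL : Nat → Nat → List Nat
  | 0, n => [n]
  | f+1, n => if n = 1 then [n] else n :: orbitL f (popcount n)

-- sum(m.bit_length() - m.bit_count() for m in l)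
def sumZ (l : List Nat) : Int :=
  (l.map (fun m => (bitLen m : Int) - (popcount m : Int))).sum

def solution_alt (s : String) : List Int :=
  if s.toList = ['1'] then [0, 0]
  else
    let ms := orbitL (s.toList.length + 63) (s.toList.length - s.toList.count '0')
    [(ms.length : Int), ((s.toList.count '0' : Nat) : Int) + sumZ ms]

-- ===== PRECONDITION & SPEC =====
-- Pre_ excludes inputs consisting only of '0' characters (including the empty string):
-- there A's while loop never terminates (state oscillates at ''/'0'); B's recursion
-- diverges there too (RecursionError).
def Pre_solution (s : String) : Prop := (s.toList.any (fun c => c ≠ '0')) = true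
instance (s : String) : Decidable (Pre_solution s) := by unfold Pre_solution; infer_instance

def pvWitness_solution : String := "0110"

def Spec_solution (s : String) (out : List Int) : Prop := out = solution_alt s
instance (s : String) (out : List Int) : Decidable (Spec_solution s out) := by unfold Spec_solution; infer_instance

-- ===== CLAIM (what is proved, stated in full; the proofs are below) =====
def Claim_equal_solution : Prop := ∀ (s : String), Dom_solution s → Pre_solution s → Spec_solution s (solution s)

-- ===== LEMMAS AND PROOFS =====

theorem binRec_length (n : Nat) : (binRec n).length = bitLen n := by
  induction n using Nat.strong_induction_on with
  | _ n ih =>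
    match n with
    | 0 => simp [binRec, bitLen]
    | m+1 =>
      rw [binRec, bitLen]
      simp [ih ((m+1)/2) (by omega)]

theorem bitLen_pos (n : Nat) (h : 1 ≤ n) : 1 ≤ bitLen n := by
  match n with
  | m+1 => rw [bitLen]; omega

theorem popcount_pos (n : Nat) (h : 1 ≤ n) : 1 ≤ popcount n := by
  induction n using Nat.strong_induction_on with
  | _ n ih =>
    match n with
    | m+1 =>
      rw [popcount]
      rcases Nat.lt_or_ge m 1 with hm | hm
      · interval_cases m <;> simp [popcount]
      · have := ih ((m+1)/2) (by omega) (by omega)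
        omega

theorem popcount_le (n : Nat) : popcount n ≤ n := by
  induction n using Nat.strong_induction_on with
  | _ n ih =>
    match n with
    | 0 => simp [popcount]
    | m+1 =>
      rw [popcount]
      have := ih ((m+1)/2) (by omega)
      omega

theorem popcount_lt (n : Nat) (h : 2 ≤ n) : popcount n < n := by
  match n, h with
  | m+1, _ =>
    rw [popcount]
    have := popcount_le ((m+1)/2)
    omega

theorem binRec_count0 (n : Nat) :
    (binRec n).count '0' + popcount n = bitLen n := by
  induction n using Nat.strong_induction_on with
  | _ n ih =>
    match n with
    | 0 => simp [binRec, popcount, bitLen]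
    | m+1 =>
      rw [binRec, popcount, bitLen]
      have := ih ((m+1)/2) (by omega)
      rcases Nat.mod_two_eq_zero_or_one (m+1) with h | h <;>
        simp [h, List.count_append] <;> omega

theorem binRec_filter_length (n : Nat) :
    ((binRec n).filter (fun c => c ≠ '0')).length = popcount n := by
  induction n using Nat.strong_induction_on with
  | _ n ih =>
    match n with
    | 0 => simp [binRec, popcount]
    | m+1 =>
      rw [binRec, popcount]
      have := ih ((m+1)/2) (by omega)
      rcases Nat.mod_two_eq_zero_or_one (m+1) with h | h <;>
        · simp [h, List.filter_append]
          simpa using this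

theorem binRec_one : binRec 1 = ['1'] := by
  rw [binRec]; simp [binRec]

theorem binRepr_eq_one_iff (n : Nat) (h : 1 ≤ n) : binRepr n = ['1'] ↔ n = 1 := by
  constructor
  · intro he
    by_contra hne
    have h2 : 2 ≤ n := by omega
    have hlen : (binRepr n).length = bitLen n := by
      rw [binRepr, if_neg (by omega)]; exact binRec_length n
    have : 2 ≤ bitLen n := by
      match n, h2 with
      | m+1, _ =>
        rw [bitLen]
        have := bitLen_pos ((m+1)/2) (by omega)
        omega
    rw [he] at hlen
    simp at hlen
    omega
  · intro he; subst he
    rw [binRepr, if_neg (by omega)]; exact binRec_one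

-- general list fact: length of the non-'0' filter = length minus count of '0'
theorem filter_length_eq_sub (l : List Char) :
    (l.filter (fun c => c ≠ '0')).length = l.length - l.count '0' := by
  induction l with
  | nil => simp
  | cons c t ih =>
    have hle : t.count '0' ≤ t.length := List.count_le_length
    by_cases hc : c = '0' <;> simp [hc] at ih ⊢ <;> omega

-- the ideal (fuel-free) orbit, used only in the proofs
def orbitT (n : Nat) : List Nat :=
  if h : n ≤ 1 then [n] else n :: orbitT (popcount n)
decreasing_by exact popcount_lt n (by omega)

theorem orbitL_eq (f : Nat) : ∀ n, 1 ≤ n → n ≤ f → orbitL f n = orbitT n := by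
  induction f with
  | zero => intro n h1 h2; omega
  | succ f ih =>
    intro n h1 h2
    rw [orbitL]
    by_cases hn : n = 1
    · subst hn; rw [orbitT]; simp
    · have h2n : 2 ≤ n := by omega
      rw [if_neg hn, orbitT, dif_neg (by omega)]
      have hp := popcount_lt n h2n
      rw [ih (popcount n) (popcount_pos n h1) (by omega)]

theorem sumZ_cons (m : Nat) (l : List Nat) :
    sumZ (m :: l) = ((bitLen m : Int) - (popcount m : Int)) + sumZ l := by
  simp [sumZ]

theorem orbitT_two (n : Nat) (h : 2 ≤ n) : orbitT n = n :: orbitT (popcount n) := by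
  rw [orbitT, dif_neg (by omega)]

-- A's loop from state bin(n) computes exactly the orbit's aggregates
theorem loopA_orbit (n : Nat) : 1 ≤ n → ∀ f, n ≤ f → ∀ c r : Int,
    loopA f (binRepr n) c r
      = [c + ((orbitT n).length : Int) - 1, r + sumZ (orbitT n)] := by
  induction n using Nat.strong_induction_on with
  | _ n ih =>
    intro h1 f hf c r
    match f with
    | 0 => omega
    | g+1 =>
      rw [loopA]
      by_cases hn : n = 1
      · subst hn
        rw [if_pos ((binRepr_eq_one_iff 1 (by omega)).mpr rfl), orbitT]
        simp [sumZ, bitLen, popcount]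
      · have h2n : 2 ≤ n := by omega
        rw [if_neg (fun he => hn ((binRepr_eq_one_iff n h1).mp he))]
        have hrep : binRepr n = binRec n := by rw [binRepr, if_neg (by omega)]
        rw [hrep, binRec_filter_length n]
        have hp := popcount_lt n h2n
        have hpp := popcount_pos n h1
        rw [ih (popcount n) hp hpp g (by omega)]
        have hc0 := binRec_count0 n
        have hcast : ((binRec n).count '0' : Int)
            = (bitLen n : Int) - (popcount n : Int) := by omega
        rw [hcast, orbitT_two n h2n, sumZ_cons]
        simp
        constructor <;> ring

-- ===== VERDICT (by name: the statement is the Claim_ definition above) =====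
theorem solution_spec : Claim_equal_solution := by
  intro s _ hpre
  unfold Spec_solution solution solution_alt
  by_cases h1 : s.toList = ['1']
  · rw [h1]; rfl
  · simp only [h1, if_false]
    have hstep : s.toList.length + 64 = (s.toList.length + 63) + 1 := by omega
    rw [hstep, loopA, if_neg h1, filter_length_eq_sub s.toList, zero_add, zero_add]
    have hn : 1 ≤ s.toList.length - s.toList.count '0' := by
      unfold Pre_solution at hpre
      rw [List.any_eq_true] at hpre
      obtain ⟨c, hc, hcne⟩ := hpre
      have hle := List.count_le_length (l := s.toList) (a := '0')
      rcases Nat.lt_or_ge (s.toList.count '0') s.toList.length with h | h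
      · omega
      · exfalso
        have heq : s.toList.count '0' = s.toList.length := by omega
        have := List.count_eq_length.mp heq c hc
        simp at hcne
        exact hcne this.symm
    rw [loopA_orbit _ hn (s.toList.length + 63) (by omega),
        orbitL_eq (s.toList.length + 63) _ hn (by omega)]
    simp
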